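-- pv_equiv track=rewrite | github.com/AlexVulf/TrandsITplus | 2047.py | can_reach_destination
-- ===== SOURCE A (Python) =====
-- from collections import deque
--
-- def can_reach_destination(origem, passageiros, destino, voos):
--     fila = deque([(origem, passageiros)])
--     visitadas = set()
--
--     while fila:
--         cidade_atual, pass_restantes = fila.popleft()
--
--         if cidade_atual == destino:
--             return True
--
--         if cidade_atual not in visitadas:
--             visitadas.add(cidade_atual)
--             if cidade_atual in voos:
--                 for proxima_cidade, capacidade in voos[cidade_atual]:
--                     if capacidade >= pass_restantes and proxima_cidade not in visitadas:
--                         fila.append((proxima_cidade, pass_restantes))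
--
--     return False
-- ===== SOURCE B (Python) =====
-- def can_reach_destination(origem, passageiros, destino, voos):
--     # Round-based saturation: repeatedly sweep the whole flight table, adding
--     # every city reachable by an adequate-capacity flight from an already
--     # reachable city, until a full sweep adds nothing; then test destino.
--     reach = {origem}
--     changed = True
--     while changed:
--         changed = False
--         for cidade in voos:
--             if cidade in reach:
--                 for proxima, capacidade in voos[cidade]:
--                     if capacidade >= passageiros and proxima not in reach:
--                         reach.add(proxima)
--                         changed = True
--     return destino in reach
-- ===== Notes on version B (the rewrite author's own statement) =====
-- stated objective: alternative
-- what changed: Replaced the BFS worklist (deque + per-node expansion with queue bookkeeping) by a round-based fixpoint saturation: repeatedly sweep the whole flight table adding every city reachable by an adequate-capacity flight from an already-reachable city until a sweep adds nothing, then test membership of destino; reachability is order-independent, so the results coincide.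
import Mathlib
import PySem

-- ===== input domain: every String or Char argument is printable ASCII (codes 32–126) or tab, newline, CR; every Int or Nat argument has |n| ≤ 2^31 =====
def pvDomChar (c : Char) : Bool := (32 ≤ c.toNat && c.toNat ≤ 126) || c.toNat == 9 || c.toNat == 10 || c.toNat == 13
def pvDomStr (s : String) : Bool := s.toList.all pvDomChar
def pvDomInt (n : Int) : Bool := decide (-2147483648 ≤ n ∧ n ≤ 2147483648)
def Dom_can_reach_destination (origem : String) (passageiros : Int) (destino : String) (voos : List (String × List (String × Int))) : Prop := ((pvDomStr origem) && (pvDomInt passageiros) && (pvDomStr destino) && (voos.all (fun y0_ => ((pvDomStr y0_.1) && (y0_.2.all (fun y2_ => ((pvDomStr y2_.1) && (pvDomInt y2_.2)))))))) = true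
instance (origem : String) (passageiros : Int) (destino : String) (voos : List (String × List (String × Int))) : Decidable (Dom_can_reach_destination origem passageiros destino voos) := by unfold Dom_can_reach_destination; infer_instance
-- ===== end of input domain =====

-- B replaces A's BFS worklist by a round-based fixpoint saturation of the reachable-city set
-- (alternative decomposition, similar cost on these inputs; no speed claim).


-- ===== PORT A =====
-- all cities that occur as a flight target (used only to size the fuel of the loops)
def pvTargets (voos : List (String × List (String × Int))) : List String :=
  voos.flatMap (fun kv => kv.2.map Prod.fst)

def pvUniv (origem : String) (voos : List (String × List (String × Int))) : List String :=
  origem :: pvTargets voos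

def pvEdgeCount (voos : List (String × List (String × Int))) : Nat :=
  (voos.map (fun kv => kv.2.length)).sum

-- fuel bound for A's while-loop: strictly more than |fila| + (E+1)·|{universe not yet visited}| can ever be
def pvFuelA (origem : String) (voos : List (String × List (String × Int))) : Nat :=
  2 + (pvEdgeCount voos + 1) * (pvUniv origem voos).length

-- the while-loop of A: fila is the deque, vis the visited set; fuel only makes it total (proved sufficient below)
def pvBfs (destino : String) (voos : List (String × List (String × Int))) :
    Nat → List (String × Int) → PySem.Set String → Bool
  | 0, _, _ => false
  | _ + 1, [], _ => false
  | fuel + 1, (cidade, pr) :: rest, vis =>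
    if cidade = destino then true
    else if PySem.Set.contains vis cidade then pvBfs destino voos fuel rest vis
    else
      let vis' := PySem.Set.add vis cidade
      match (PySem.Dict.mk voos).get? cidade with
      | some rotas =>
          pvBfs destino voos fuel
            (rotas.foldl (fun f e =>
              if pr ≤ e.2 && !(PySem.Set.contains vis' e.1) then f ++ [(e.1, pr)] else f) rest)
            vis'
      | none => pvBfs destino voos fuel rest vis'

def can_reach_destination (origem : String) (passageiros : Int) (destino : String) (voos : List (String × List (String × Int))) : Bool :=
  pvBfs destino voos (pvFuelA origem voos) [(origem, passageiros)] PySem.Set.empty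

-- ===== PORT B =====
-- one sweep 'for cidade in voos: …' of B, threading (reach, changed)
def pvPass (p : Int) (voos : List (String × List (String × Int))) :
    List (String × List (String × Int)) → PySem.Set String → Bool → PySem.Set String × Bool
  | [], reach, changed => (reach, changed)
  | kv :: resto, reach, changed =>
    if PySem.Set.contains reach kv.1 then
      let st := ((PySem.Dict.mk voos).get? kv.1).getD [] |>.foldl
        (fun (st : PySem.Set String × Bool) e =>
          if p ≤ e.2 && !(PySem.Set.contains st.1 e.1) then (PySem.Set.add st.1 e.1, true) else st)
        (reach, changed)
      pvPass p voos resto st.1 st.2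
    else pvPass p voos resto reach changed

-- B's 'while changed' loop; fuel only makes it total (proved sufficient below)
def pvLoop (p : Int) (voos : List (String × List (String × Int))) :
    Nat → PySem.Set String → PySem.Set String
  | 0, reach => reach
  | fuel + 1, reach =>
    match pvPass p voos voos reach false with
    | (reach', true) => pvLoop p voos fuel reach'
    | (reach', false) => reach'

def can_reach_destination_alt (origem : String) (passageiros : Int) (destino : String) (voos : List (String × List (String × Int))) : Bool :=
  PySem.Set.contains
    (pvLoop passageiros voos ((pvUniv origem voos).length + 1) (PySem.Set.ofList [origem]))
    destino

-- ===== PRECONDITION & SPEC =====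
def Spec_can_reach_destination (origem : String) (passageiros : Int) (destino : String) (voos : List (String × List (String × Int))) (out : Bool) : Prop := out = can_reach_destination_alt origem passageiros destino voos
instance (origem : String) (passageiros : Int) (destino : String) (voos : List (String × List (String × Int))) (out : Bool) : Decidable (Spec_can_reach_destination origem passageiros destino voos out) := by unfold Spec_can_reach_destination; infer_instance

-- ===== CLAIM (what is proved, stated in full; the proofs are below) =====
def Claim_equal_can_reach_destination : Prop := ∀ (origem : String) (passageiros : Int) (destino : String) (voos : List (String × List (String × Int))), Dom_can_reach_destination origem passageiros destino voos → Spec_can_reach_destination origem passageiros destino voos (can_reach_destination origem passageiros destino voos)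

-- ===== LEMMAS AND PROOFS =====

-- reachability from u through flights whose capacity admits p passengers
inductive pvRch (p : Int) (voos : List (String × List (String × Int))) : String → String → Prop
  | refl (u : String) : pvRch p voos u u
  | step {u v w : String} {rotas : List (String × Int)} {c : Int} :
      pvRch p voos u v → (PySem.Dict.mk voos).get? v = some rotas → (w, c) ∈ rotas → p ≤ c →
      pvRch p voos u w

theorem pvTargets_mem {voos : List (String × List (String × Int))}
    {v w : String} {rotas : List (String × Int)} {c : Int}
    (hget : (PySem.Dict.mk voos).get? v = some rotas) (hmem : (w, c) ∈ rotas) :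
    w ∈ pvTargets voos := by
  have h := PySem.Dict.mem_items_of_get?_eq_some (PySem.Dict.mk voos) hget
  simp only [pvTargets, List.mem_flatMap]
  exact ⟨(v, rotas), h, by simpa using List.mem_map_of_mem (f := Prod.fst) hmem⟩

theorem pvRotas_le_edgeCount {voos : List (String × List (String × Int))}
    {v : String} {rotas : List (String × Int)}
    (hget : (PySem.Dict.mk voos).get? v = some rotas) :
    rotas.length ≤ pvEdgeCount voos := by
  have h := PySem.Dict.mem_items_of_get?_eq_some (PySem.Dict.mk voos) hget
  have : rotas.length ∈ (voos.map (fun kv => kv.2.length)) :=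
    List.mem_map_of_mem (f := fun kv => kv.2.length) h
  exact List.le_sum_of_mem this

theorem pvCountP_lt {α : Type} (p q : α → Bool) (l : List α)
    (h : ∀ a ∈ l, q a = true → p a = true) (x : α) (hx : x ∈ l)
    (hpx : p x = true) (hqx : q x = false) : l.countP q < l.countP p := by
  induction l with
  | nil => simp at hx
  | cons a tl ih =>
    rcases List.mem_cons.1 hx with rfl | hxtl
    · have hle : tl.countP q ≤ tl.countP p :=
        List.countP_mono_left (fun a ha => h a (List.mem_cons_of_mem _ ha))
      simp [hpx, hqx]
      omega
    · have hlt := ih (fun a ha => h a (List.mem_cons_of_mem _ ha)) hxtl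
      simp only [List.countP_cons]
      by_cases hqa : q a = true
      · have hpa := h a List.mem_cons_self hqa
        simp [hqa, hpa]; omega
      · simp only [Bool.not_eq_true] at hqa
        simp [hqa]; omega

theorem pvFilter_lt (U : List String) (s t : PySem.Set String)
    (hsub : ∀ y ∈ s, y ∈ t) (x : String) (hxU : x ∈ U) (hxt : x ∈ t) (hxs : x ∉ s) :
    (U.filter (fun u => !(PySem.Set.contains t u))).length <
      (U.filter (fun u => !(PySem.Set.contains s u))).length := by
  rw [← List.countP_eq_length_filter, ← List.countP_eq_length_filter]
  refine pvCountP_lt _ _ U ?_ x hxU ?_ ?_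
  · intro a _ hq
    simp only [Bool.not_eq_true'] at hq ⊢
    cases h' : PySem.Set.contains s a with
    | false => rfl
    | true =>
      have ha : a ∈ t := hsub a ((PySem.Set.contains_iff _ _).1 h')
      rw [(PySem.Set.contains_iff _ _).2 ha] at hq
      exact hq
  · simp only [Bool.not_eq_true']
    cases h' : PySem.Set.contains s x with
    | false => rfl
    | true => exact absurd ((PySem.Set.contains_iff _ _).1 h') hxs
  · simp
    exact hxt

-- measure for A's loop
def pvMeasA (origem : String) (voos : List (String × List (String × Int)))
    (fila : List (String × Int)) (vis : PySem.Set String) : Nat :=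
  fila.length + (pvEdgeCount voos + 1) *
    ((pvUniv origem voos).filter (fun u => !(PySem.Set.contains vis u))).length

theorem pvBfs_sound (origem destino : String) (p : Int)
    (voos : List (String × List (String × Int))) :
    ∀ (fuel : Nat) (fila : List (String × Int)) (vis : PySem.Set String),
      (∀ e ∈ fila, e.2 = p ∧ pvRch p voos origem e.1) →
      pvBfs destino voos fuel fila vis = true → pvRch p voos origem destino := by
  intro fuel
  induction fuel with
  | zero => intro fila vis _ hrun; simp [pvBfs] at hrun
  | succ fuel ih =>
    intro fila vis hfila hrun
    cases fila with
    | nil => simp [pvBfs] at hrun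
    | cons head rest =>
      obtain ⟨cidade, pr⟩ := head
      simp only [pvBfs] at hrun
      by_cases hd : cidade = destino
      · exact hd ▸ (hfila (cidade, pr) List.mem_cons_self).2
      · rw [if_neg hd] at hrun
        by_cases hv : PySem.Set.contains vis cidade = true
        · rw [if_pos hv] at hrun
          exact ih rest vis (fun e he => hfila e (List.mem_cons_of_mem _ he)) hrun
        · rw [if_neg hv] at hrun
          cases hget : (PySem.Dict.mk voos).get? cidade with
          | none =>
            rw [hget] at hrun
            dsimp only at hrun
            exact ih rest _ (fun e he => hfila e (List.mem_cons_of_mem _ he)) hrun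
          | some rotas =>
            rw [hget] at hrun
            dsimp only at hrun
            rw [PySem.List.foldl_append_if
              (fun e => pr ≤ e.2 && !(PySem.Set.contains (PySem.Set.add vis cidade) e.1))
              (fun e => (e.1, pr)) rotas rest] at hrun
            refine ih _ _ ?_ hrun
            intro e he
            rcases List.mem_append.1 he with h | h
            · exact hfila e (List.mem_cons_of_mem _ h)
            · obtain ⟨e', he', rfl⟩ := List.mem_map.1 h
              have he'' := List.mem_filter.1 he'
              have hcond := he''.2
              simp only [Bool.and_eq_true, decide_eq_true_eq] at hcond
              have hp : pr = p := (hfila (cidade, pr) List.mem_cons_self).1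
              refine ⟨hp, ?_⟩
              exact pvRch.step (hfila (cidade, pr) List.mem_cons_self).2 hget
                (show (e'.1, e'.2) ∈ rotas by simpa using he''.1) (hp ▸ hcond.1)

-- every city reachable from origem is visited or reachable from some queued city
theorem pvFrontier (origem : String) (p : Int) (voos : List (String × List (String × Int)))
    (fila : List (String × Int)) (vis : PySem.Set String)
    (horig : origem ∈ vis ∨ ∃ e ∈ fila, e.1 = origem)
    (hclosed : ∀ u ∈ vis, ∀ rotas w c, (PySem.Dict.mk voos).get? u = some rotas → (w, c) ∈ rotas → p ≤ c →
      w ∈ vis ∨ ∃ e ∈ fila, e.1 = w) :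
    ∀ u, pvRch p voos origem u → u ∈ vis ∨ ∃ e ∈ fila, pvRch p voos e.1 u := by
  intro u h
  induction h with
  | refl =>
    rcases horig with h | ⟨e, he, heq⟩
    · exact Or.inl h
    · exact Or.inr ⟨e, he, heq ▸ pvRch.refl e.1⟩
  | step hprev hget hmem hc ihh =>
    rename_i v w rotas c
    rcases ihh with hvv | ⟨e, he, hre⟩
    · rcases hclosed v hvv rotas w c hget hmem hc with hw | ⟨e, he, heq⟩
      · exact Or.inl hw
      · exact Or.inr ⟨e, he, heq ▸ pvRch.refl e.1⟩
    · exact Or.inr ⟨e, he, pvRch.step hre hget hmem hc⟩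

theorem pvBfs_complete (origem destino : String) (p : Int)
    (voos : List (String × List (String × Int))) :
    ∀ (fuel : Nat) (fila : List (String × Int)) (vis : PySem.Set String),
      pvMeasA origem voos fila vis < fuel →
      (∀ e ∈ fila, e.2 = p) →
      (∀ u ∈ vis, u ∈ pvUniv origem voos) →
      (∀ e ∈ fila, e.1 ∈ pvUniv origem voos) →
      destino ∉ vis →
      (origem ∈ vis ∨ ∃ e ∈ fila, e.1 = origem) →
      (∀ u ∈ vis, ∀ rotas w c, (PySem.Dict.mk voos).get? u = some rotas → (w, c) ∈ rotas → p ≤ c →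
        w ∈ vis ∨ ∃ e ∈ fila, e.1 = w) →
      pvRch p voos origem destino →
      pvBfs destino voos fuel fila vis = true := by
  intro fuel
  induction fuel with
  | zero => intro fila vis hm _ _ _ _ _ _ _; exact absurd hm (Nat.not_lt_zero _)
  | succ fuel ih =>
    intro fila vis hm hpre hvisU hfilaU hdest horig hclosed hrch
    have hfr := pvFrontier origem p voos fila vis horig hclosed destino hrch
    cases fila with
    | nil =>
      rcases hfr with h | ⟨e, he, _⟩
      · exact absurd h hdest
      · simp at he
    | cons head rest =>
      obtain ⟨cidade, pr⟩ := head
      simp only [pvBfs]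
      by_cases hd : cidade = destino
      · rw [if_pos hd]
      · rw [if_neg hd]
        have hp : pr = p := hpre (cidade, pr) List.mem_cons_self
        by_cases hv : PySem.Set.contains vis cidade = true
        · rw [if_pos hv]
          refine ih rest vis ?_ (fun e he => hpre e (List.mem_cons_of_mem _ he)) hvisU
            (fun e he => hfilaU e (List.mem_cons_of_mem _ he)) hdest ?_ ?_ hrch
          · unfold pvMeasA at hm ⊢
            simp only [List.length_cons] at hm
            omega
          · rcases horig with h | ⟨e, he, heq⟩
            · exact Or.inl h
            · rcases List.mem_cons.1 he with rfl | h2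
              · exact Or.inl (heq ▸ (PySem.Set.contains_iff _ _).1 hv)
              · exact Or.inr ⟨e, h2, heq⟩
          · intro u hu rotas w c hget hmem hc
            rcases hclosed u hu rotas w c hget hmem hc with h | ⟨e, he, heq⟩
            · exact Or.inl h
            · rcases List.mem_cons.1 he with rfl | h2
              · exact Or.inl (heq ▸ (PySem.Set.contains_iff _ _).1 hv)
              · exact Or.inr ⟨e, h2, heq⟩
        · rw [if_neg hv]
          have hvmem : cidade ∉ vis := fun hmem => hv ((PySem.Set.contains_iff _ _).2 hmem)
          have hcidU : cidade ∈ pvUniv origem voos := hfilaU (cidade, pr) List.mem_cons_self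
          have hdc : destino ∉ PySem.Set.add vis cidade := by
            intro hmem
            rcases (PySem.Set.mem_add _ _ _).1 hmem with h | h
            · exact hdest h
            · exact hd h.symm
          have hvisU' : ∀ u ∈ PySem.Set.add vis cidade, u ∈ pvUniv origem voos := by
            intro u hu
            rcases (PySem.Set.mem_add _ _ _).1 hu with h | h
            · exact hvisU u h
            · exact h ▸ hcidU
          have hsub : ∀ y ∈ vis, y ∈ PySem.Set.add vis cidade :=
            fun y hy => (PySem.Set.mem_add _ _ _).2 (Or.inl hy)
          have hcid' : cidade ∈ PySem.Set.add vis cidade :=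
            (PySem.Set.mem_add _ _ _).2 (Or.inr rfl)
          have hflt := pvFilter_lt (pvUniv origem voos) vis (PySem.Set.add vis cidade)
            hsub cidade hcidU hcid' hvmem
          cases hget : (PySem.Dict.mk voos).get? cidade with
          | none =>
            dsimp only
            refine ih rest (PySem.Set.add vis cidade) ?_
              (fun e he => hpre e (List.mem_cons_of_mem _ he)) hvisU'
              (fun e he => hfilaU e (List.mem_cons_of_mem _ he)) hdc ?_ ?_ hrch
            · unfold pvMeasA at hm ⊢
              simp only [List.length_cons] at hm
              have h1 : (pvEdgeCount voos + 1) *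
                  ((pvUniv origem voos).filter
                    (fun u => !(PySem.Set.contains (PySem.Set.add vis cidade) u))).length ≤
                  (pvEdgeCount voos + 1) *
                  ((pvUniv origem voos).filter (fun u => !(PySem.Set.contains vis u))).length :=
                Nat.mul_le_mul le_rfl (le_of_lt hflt)
              omega
            · rcases horig with h | ⟨e, he, heq⟩
              · exact Or.inl (hsub _ h)
              · rcases List.mem_cons.1 he with rfl | h2
                · exact Or.inl (heq ▸ hcid')
                · exact Or.inr ⟨e, h2, heq⟩
            · intro u hu rotas' w c hget' hmem' hc
              rcases (PySem.Set.mem_add _ _ _).1 hu with h | h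
              · rcases hclosed u h rotas' w c hget' hmem' hc with h2 | ⟨e, he, heq⟩
                · exact Or.inl (hsub _ h2)
                · rcases List.mem_cons.1 he with rfl | h3
                  · exact Or.inl (heq ▸ hcid')
                  · exact Or.inr ⟨e, h3, heq⟩
              · subst h
                rw [hget] at hget'
                exact absurd hget' (by simp)
          | some rotas =>
            dsimp only
            rw [PySem.List.foldl_append_if
              (fun e => pr ≤ e.2 && !(PySem.Set.contains (PySem.Set.add vis cidade) e.1))
              (fun e => (e.1, pr)) rotas rest]
            have hrl := pvRotas_le_edgeCount hget
            refine ih _ (PySem.Set.add vis cidade) ?_ ?_ hvisU' ?_ hdc ?_ ?_ hrch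
            · unfold pvMeasA at hm ⊢
              simp only [List.length_cons, List.length_append, List.length_map] at hm ⊢
              have hfl : (rotas.filter
                  (fun e => pr ≤ e.2 && !(PySem.Set.contains (PySem.Set.add vis cidade) e.1))).length ≤
                  rotas.length := List.length_filter_le _ _
              have h1 : (pvEdgeCount voos + 1) *
                  ((pvUniv origem voos).filter
                    (fun u => !(PySem.Set.contains (PySem.Set.add vis cidade) u))).length +
                  (pvEdgeCount voos + 1) ≤
                  (pvEdgeCount voos + 1) *
                  ((pvUniv origem voos).filter (fun u => !(PySem.Set.contains vis u))).length := by
                have h2 : ((pvUniv origem voos).filter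
                    (fun u => !(PySem.Set.contains (PySem.Set.add vis cidade) u))).length + 1 ≤
                    ((pvUniv origem voos).filter (fun u => !(PySem.Set.contains vis u))).length := hflt
                calc (pvEdgeCount voos + 1) *
                    ((pvUniv origem voos).filter
                      (fun u => !(PySem.Set.contains (PySem.Set.add vis cidade) u))).length +
                    (pvEdgeCount voos + 1)
                    = (pvEdgeCount voos + 1) *
                      (((pvUniv origem voos).filter
                        (fun u => !(PySem.Set.contains (PySem.Set.add vis cidade) u))).length + 1) := by ring
                  _ ≤ (pvEdgeCount voos + 1) *
                      ((pvUniv origem voos).filter (fun u => !(PySem.Set.contains vis u))).length :=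
                    Nat.mul_le_mul le_rfl h2
              omega
            · intro e he
              rcases List.mem_append.1 he with h | h
              · exact hpre e (List.mem_cons_of_mem _ h)
              · obtain ⟨e', _, rfl⟩ := List.mem_map.1 h
                exact hp
            · intro e he
              rcases List.mem_append.1 he with h | h
              · exact hfilaU e (List.mem_cons_of_mem _ h)
              · obtain ⟨e', he', rfl⟩ := List.mem_map.1 h
                have ht : e'.1 ∈ pvTargets voos := pvTargets_mem hget
                  (show (e'.1, e'.2) ∈ rotas by simpa using (List.mem_filter.1 he').1)
                simp [pvUniv, ht]
            · rcases horig with h | ⟨e, he, heq⟩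
              · exact Or.inl (hsub _ h)
              · rcases List.mem_cons.1 he with rfl | h2
                · exact Or.inl (heq ▸ hcid')
                · exact Or.inr ⟨e, List.mem_append_left _ h2, heq⟩
            · intro u hu rotas' w c hget' hmem' hc
              rcases (PySem.Set.mem_add _ _ _).1 hu with h | h
              · rcases hclosed u h rotas' w c hget' hmem' hc with h2 | ⟨e, he, heq⟩
                · exact Or.inl (hsub _ h2)
                · rcases List.mem_cons.1 he with rfl | h3
                  · exact Or.inl (heq ▸ hcid')
                  · exact Or.inr ⟨e, List.mem_append_left _ h3, heq⟩
              · rw [h] at hget'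
                rw [hget] at hget'
                injection hget' with hr
                subst hr
                by_cases hw : w ∈ PySem.Set.add vis cidade
                · exact Or.inl hw
                · have hprc : pr ≤ c := by rw [hp]; exact hc
                  have hmf : (w, c) ∈ rotas.filter
                      (fun e => pr ≤ e.2 && !(PySem.Set.contains (PySem.Set.add vis cidade) e.1)) :=
                    List.mem_filter.2 ⟨hmem', by
                      simp [hprc]
                      exact ⟨fun h1 => hw ((PySem.Set.mem_add _ _ _).2 (Or.inl h1)),
                        fun h1 => hw ((PySem.Set.mem_add _ _ _).2 (Or.inr h1))⟩⟩
                  exact Or.inr ⟨(w, pr), List.mem_append_right _ (List.mem_map.2 ⟨(w, c), hmf, rfl⟩), rfl⟩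


theorem pvFold_mono (p : Int) (l : List (String × Int)) :
    ∀ (st : PySem.Set String × Bool) (x : String), x ∈ st.1 →
      x ∈ (l.foldl (fun (st : PySem.Set String × Bool) e =>
        if p ≤ e.2 && !(PySem.Set.contains st.1 e.1) then (PySem.Set.add st.1 e.1, true) else st) st).1 := by
  induction l with
  | nil => intro st x hx; simpa using hx
  | cons e tl ih =>
    intro st x hx
    simp only [List.foldl_cons]
    split
    · exact ih _ x (by simpa [PySem.Set.mem_add] using Or.inl hx)
    · exact ih _ x hx

theorem pvFold_inv (p : Int) (l : List (String × Int)) (P : String → Prop)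
    (hP : ∀ e ∈ l, p ≤ e.2 → P e.1) :
    ∀ (st : PySem.Set String × Bool), (∀ x ∈ st.1, P x) →
      ∀ x ∈ (l.foldl (fun (st : PySem.Set String × Bool) e =>
        if p ≤ e.2 && !(PySem.Set.contains st.1 e.1) then (PySem.Set.add st.1 e.1, true) else st) st).1, P x := by
  induction l with
  | nil => intro st h x hx; exact h x (by simpa using hx)
  | cons e tl ih =>
    intro st h x hx
    simp only [List.foldl_cons] at hx
    by_cases hcond : (decide (p ≤ e.2) && !(PySem.Set.contains st.1 e.1)) = true
    · rw [if_pos hcond] at hx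
      refine ih (fun e' he' hc => hP e' (List.mem_cons_of_mem _ he') hc) _ ?_ x hx
      intro y hy
      rcases (PySem.Set.mem_add st.1 e.1 y).1 hy with h1 | h1
      · exact h y h1
      · subst h1; exact hP e List.mem_cons_self (by simp at hcond; exact hcond.1)
    · rw [if_neg hcond] at hx
      exact ih (fun e' he' hc => hP e' (List.mem_cons_of_mem _ he') hc) st h x hx

theorem pvFold_snd_true (p : Int) (l : List (String × Int)) :
    ∀ (st : PySem.Set String × Bool), st.2 = true →
      (l.foldl (fun (st : PySem.Set String × Bool) e =>
        if p ≤ e.2 && !(PySem.Set.contains st.1 e.1) then (PySem.Set.add st.1 e.1, true) else st) st).2 = true := by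
  induction l with
  | nil => intro st h; simpa using h
  | cons e tl ih =>
    intro st h
    simp only [List.foldl_cons]
    split
    · exact ih _ rfl
    · exact ih _ h

theorem pvFold_false (p : Int) (l : List (String × Int)) :
    ∀ (r : PySem.Set String),
      (l.foldl (fun (st : PySem.Set String × Bool) e =>
        if p ≤ e.2 && !(PySem.Set.contains st.1 e.1) then (PySem.Set.add st.1 e.1, true) else st) (r, false)).2 = false →
      (l.foldl (fun (st : PySem.Set String × Bool) e =>
        if p ≤ e.2 && !(PySem.Set.contains st.1 e.1) then (PySem.Set.add st.1 e.1, true) else st) (r, false)) = (r, false)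
        ∧ ∀ e ∈ l, p ≤ e.2 → e.1 ∈ r := by
  induction l with
  | nil => intro r _; simp
  | cons e tl ih =>
    intro r hf
    simp only [List.foldl_cons] at hf ⊢
    by_cases hcond : (decide (p ≤ e.2) && !(PySem.Set.contains r e.1)) = true
    · exfalso
      rw [if_pos hcond] at hf
      rw [pvFold_snd_true p tl _ rfl] at hf; simp at hf
    · rw [if_neg hcond] at hf ⊢
      obtain ⟨h1, h2⟩ := ih r hf
      refine ⟨h1, ?_⟩
      intro e' he' hc
      rcases List.mem_cons.1 he' with rfl | h
      · by_contra hmem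
        exact hcond (by simp [hc]; simpa [PySem.Set.contains_iff] using hmem)
      · exact h2 e' h hc

theorem pvFold_grow (p : Int) (l : List (String × Int)) :
    ∀ (st : PySem.Set String × Bool), st.2 = false →
      (l.foldl (fun (st : PySem.Set String × Bool) e =>
        if p ≤ e.2 && !(PySem.Set.contains st.1 e.1) then (PySem.Set.add st.1 e.1, true) else st) st).2 = true →
      ∃ x, x ∈ (l.foldl (fun (st : PySem.Set String × Bool) e =>
        if p ≤ e.2 && !(PySem.Set.contains st.1 e.1) then (PySem.Set.add st.1 e.1, true) else st) st).1 ∧ x ∉ st.1 := by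
  induction l with
  | nil => intro st h1 h2; rw [List.foldl_nil] at h2; rw [h1] at h2; exact absurd h2 (by simp)
  | cons e tl ih =>
    intro st h1 h2
    simp only [List.foldl_cons] at h2 ⊢
    by_cases hcond : (decide (p ≤ e.2) && !(PySem.Set.contains st.1 e.1)) = true
    · rw [if_pos hcond]
      refine ⟨e.1, pvFold_mono p tl _ e.1 (by simp [PySem.Set.mem_add]), ?_⟩
      simp at hcond
      simpa [PySem.Set.contains_iff] using hcond.2
    · rw [if_neg hcond] at h2 ⊢
      exact ih st h1 h2

theorem pvPass_mono (p : Int) (voos : List (String × List (String × Int))) :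
    ∀ (entries : List (String × List (String × Int))) (reach : PySem.Set String) (changed : Bool)
      (x : String), x ∈ reach → x ∈ (pvPass p voos entries reach changed).1 := by
  intro entries
  induction entries with
  | nil => intro reach changed x hx; simpa [pvPass] using hx
  | cons kv resto ih =>
    intro reach changed x hx
    simp only [pvPass]
    split
    · exact ih _ _ x (pvFold_mono p _ (reach, changed) x hx)
    · exact ih _ _ x hx

theorem pvPass_sound (origem : String) (p : Int) (voos : List (String × List (String × Int))) :
    ∀ (entries : List (String × List (String × Int))) (reach : PySem.Set String) (changed : Bool),
      (∀ x ∈ reach, pvRch p voos origem x) →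
      ∀ x ∈ (pvPass p voos entries reach changed).1, pvRch p voos origem x := by
  intro entries
  induction entries with
  | nil => intro reach changed h x hx; exact h x (by simpa [pvPass] using hx)
  | cons kv resto ih =>
    intro reach changed h x hx
    simp only [pvPass] at hx
    by_cases hin : PySem.Set.contains reach kv.1 = true
    · rw [if_pos hin] at hx
      refine ih _ _ ?_ x hx
      cases hget : (PySem.Dict.mk voos).get? kv.1 with
      | none => simpa using h
      | some rotas =>
        simp only [Option.getD_some]
        refine pvFold_inv p rotas (pvRch p voos origem) ?_ (reach, changed) h
        intro e he hc
        exact pvRch.step (h kv.1 ((PySem.Set.contains_iff _ _).1 hin)) hget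
          (by simpa using he) hc
    · rw [if_neg hin] at hx
      exact ih _ _ h x hx

theorem pvPass_snd_true (p : Int) (voos : List (String × List (String × Int))) :
    ∀ (entries : List (String × List (String × Int))) (reach : PySem.Set String),
      (pvPass p voos entries reach true).2 = true := by
  intro entries
  induction entries with
  | nil => intro reach; simp [pvPass]
  | cons kv resto ih =>
    intro reach
    simp only [pvPass]
    split
    · rw [pvFold_snd_true p _ (reach, true) rfl]; exact ih _
    · exact ih _

theorem pvPass_fix (p : Int) (voos : List (String × List (String × Int))) :
    ∀ (entries : List (String × List (String × Int))) (reach : PySem.Set String),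
      (pvPass p voos entries reach false).2 = false →
      (pvPass p voos entries reach false).1 = reach ∧
        (∀ kv ∈ entries, PySem.Set.contains reach kv.1 = true →
          ∀ w c, (w, c) ∈ ((PySem.Dict.mk voos).get? kv.1).getD [] → p ≤ c → w ∈ reach) := by
  intro entries
  induction entries with
  | nil => intro reach _; simp [pvPass]
  | cons kv resto ih =>
    intro reach hf
    simp only [pvPass] at hf ⊢
    by_cases hin : PySem.Set.contains reach kv.1 = true
    · rw [if_pos hin] at hf ⊢
      -- the fold cannot have set changed, or the pass would end with changed = true
      have hsnd : (((PySem.Dict.mk voos).get? kv.1).getD [] |>.foldl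
          (fun (st : PySem.Set String × Bool) e =>
            if p ≤ e.2 && !(PySem.Set.contains st.1 e.1) then (PySem.Set.add st.1 e.1, true) else st)
          (reach, false)).2 = false := by
        by_contra hT
        rw [eq_comm] at hT
        have h2 : (((PySem.Dict.mk voos).get? kv.1).getD [] |>.foldl
            (fun (st : PySem.Set String × Bool) e =>
              if p ≤ e.2 && !(PySem.Set.contains st.1 e.1) then (PySem.Set.add st.1 e.1, true) else st)
            (reach, false)).2 = true := by
          cases hb : (((PySem.Dict.mk voos).get? kv.1).getD [] |>.foldl
              (fun (st : PySem.Set String × Bool) e =>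
                if p ≤ e.2 && !(PySem.Set.contains st.1 e.1) then (PySem.Set.add st.1 e.1, true) else st)
              (reach, false)).2
          · exact absurd hb.symm hT
          · rfl
        generalize hst : (((PySem.Dict.mk voos).get? kv.1).getD [] |>.foldl
            (fun (st : PySem.Set String × Bool) e =>
              if p ≤ e.2 && !(PySem.Set.contains st.1 e.1) then (PySem.Set.add st.1 e.1, true) else st)
            (reach, false)) = st at hf h2
        cases st with
        | mk r b =>
          simp only at h2; subst h2
          rw [pvPass_snd_true p voos resto r] at hf
          simp at hf
      obtain ⟨heq, hloc⟩ := pvFold_false p _ reach hsnd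
      rw [heq] at hf ⊢
      obtain ⟨hre, hcl⟩ := ih reach hf
      refine ⟨hre, ?_⟩
      intro kv' hkv' hin' w c hw hc
      rcases List.mem_cons.1 hkv' with rfl | h
      · exact hloc (w, c) hw hc
      · exact hcl kv' h hin' w c hw hc
    · rw [if_neg hin] at hf ⊢
      obtain ⟨hre, hcl⟩ := ih reach hf
      refine ⟨hre, ?_⟩
      intro kv' hkv' hin' w c hw hc
      rcases List.mem_cons.1 hkv' with rfl | h
      · exact absurd hin' hin
      · exact hcl kv' h hin' w c hw hc

theorem pvPass_grow (p : Int) (voos : List (String × List (String × Int))) :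
    ∀ (entries : List (String × List (String × Int))) (reach : PySem.Set String),
      (pvPass p voos entries reach false).2 = true →
      ∃ x, x ∈ (pvPass p voos entries reach false).1 ∧ x ∉ reach ∧ x ∈ pvTargets voos := by
  intro entries
  induction entries with
  | nil => intro reach h; simp [pvPass] at h
  | cons kv resto ih =>
    intro reach hf
    simp only [pvPass] at hf ⊢
    by_cases hin : PySem.Set.contains reach kv.1 = true
    · rw [if_pos hin] at hf ⊢
      cases hsnd : (((PySem.Dict.mk voos).get? kv.1).getD [] |>.foldl
          (fun (st : PySem.Set String × Bool) e =>
            if p ≤ e.2 && !(PySem.Set.contains st.1 e.1) then (PySem.Set.add st.1 e.1, true) else st)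
          (reach, false)).2 with
      | true =>
        obtain ⟨x, hx1, hx2⟩ := pvFold_grow p _ (reach, false) rfl hsnd
        have hP : ∀ e ∈ ((PySem.Dict.mk voos).get? kv.1).getD [], p ≤ e.2 →
            (e.1 ∈ reach ∨ e.1 ∈ pvTargets voos) := by
          intro e he _
          cases hget : (PySem.Dict.mk voos).get? kv.1 with
          | none => rw [hget] at he; simp at he
          | some rotas =>
            rw [hget] at he
            exact Or.inr (pvTargets_mem hget (by simpa using he))
        have hor := pvFold_inv p _ (fun y => y ∈ reach ∨ y ∈ pvTargets voos) hP
          (reach, false) (fun y hy => Or.inl hy) x hx1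
        refine ⟨x, pvPass_mono p voos resto _ _ x hx1, hx2, ?_⟩
        rcases hor with h | h
        · exact absurd h hx2
        · exact h
      | false =>
        obtain ⟨heq, _⟩ := pvFold_false p _ reach hsnd
        rw [heq] at hf ⊢
        exact ih reach hf
    · rw [if_neg hin] at hf ⊢
      exact ih reach hf


theorem pvLoop_spec (origem : String) (p : Int) (voos : List (String × List (String × Int))) :
    ∀ (fuel : Nat) (reach : PySem.Set String),
      ((pvUniv origem voos).filter (fun u => !(PySem.Set.contains reach u))).length < fuel →
      (∀ x ∈ reach, pvRch p voos origem x) →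
      (∀ x ∈ reach, x ∈ pvLoop p voos fuel reach) ∧
      (∀ x ∈ pvLoop p voos fuel reach, pvRch p voos origem x) ∧
      (∀ kv ∈ voos, kv.1 ∈ pvLoop p voos fuel reach →
        ∀ w c, (w, c) ∈ ((PySem.Dict.mk voos).get? kv.1).getD [] → p ≤ c →
          w ∈ pvLoop p voos fuel reach) := by
  intro fuel
  induction fuel with
  | zero => intro reach hfuel _; omega
  | succ fuel ih =>
    intro reach hfuel hsound
    simp only [pvLoop]
    cases hps : pvPass p voos voos reach false with
    | mk r' ch =>
      cases ch with
      | false =>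
        obtain ⟨heq, hcl⟩ := pvPass_fix p voos voos reach (by rw [hps])
        rw [hps] at heq
        simp only at heq
        subst heq
        refine ⟨fun x hx => hx, hsound, ?_⟩
        intro kv hkv hin w c hw hc
        exact hcl kv hkv ((PySem.Set.contains_iff _ _).2 hin) w c hw hc
      | true =>
        have hmono : ∀ x ∈ reach, x ∈ r' := by
          intro x hx
          have := pvPass_mono p voos voos reach false x hx
          rwa [hps] at this
        have hsound' : ∀ x ∈ r', pvRch p voos origem x := by
          intro x hx
          exact pvPass_sound origem p voos voos reach false hsound x (by rw [hps]; exact hx)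
        obtain ⟨x, hx1, hx2, hx3⟩ := pvPass_grow p voos voos reach (by rw [hps])
        rw [hps] at hx1
        have hdec : ((pvUniv origem voos).filter (fun u => !(PySem.Set.contains r' u))).length <
            ((pvUniv origem voos).filter (fun u => !(PySem.Set.contains reach u))).length :=
          pvFilter_lt _ reach r' hmono x (by simp [pvUniv, hx3]) hx1 hx2
        obtain ⟨h1, h2, h3⟩ := ih r' (by omega) hsound'
        exact ⟨fun y hy => h1 y (hmono y hy), h2, h3⟩

theorem pvAlt_iff (origem : String) (p : Int) (destino : String)
    (voos : List (String × List (String × Int))) :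
    can_reach_destination_alt origem p destino voos = true ↔ pvRch p voos origem destino := by
  unfold can_reach_destination_alt
  have h0 : ∀ x ∈ PySem.Set.ofList [origem], pvRch p voos origem x := by
    intro x hx
    have : x = origem := by simpa using (PySem.Set.mem_ofList [origem] x).1 hx
    subst this; exact pvRch.refl x
  have hfuel : ((pvUniv origem voos).filter
      (fun u => !(PySem.Set.contains (PySem.Set.ofList [origem]) u))).length <
      (pvUniv origem voos).length + 1 :=
    Nat.lt_succ_of_le (List.length_filter_le _ _)
  obtain ⟨hsub, hsound, hcl⟩ := pvLoop_spec origem p voos ((pvUniv origem voos).length + 1) _ hfuel h0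
  constructor
  · intro h
    exact hsound destino ((PySem.Set.contains_iff _ _).1 h)
  · intro h
    refine (PySem.Set.contains_iff _ _).2 ?_
    induction h with
    | refl => exact hsub origem ((PySem.Set.mem_ofList [origem] origem).2 (by simp))
    | step hprev hget hmem hc ihh =>
      rename_i v w rotas c
      refine hcl (v, rotas) ?_ ihh w c ?_ hc
      · exact PySem.Dict.mem_items_of_get?_eq_some _ hget
      · rw [hget]; simpa using hmem

theorem pvA_iff (origem : String) (p : Int) (destino : String)
    (voos : List (String × List (String × Int))) :
    can_reach_destination origem p destino voos = true ↔ pvRch p voos origem destino := by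
  unfold can_reach_destination
  constructor
  · intro h
    refine pvBfs_sound origem destino p voos _ _ _ ?_ h
    intro e he
    simp only [List.mem_singleton] at he
    subst he
    exact ⟨rfl, pvRch.refl origem⟩
  · intro h
    refine pvBfs_complete origem destino p voos _ _ PySem.Set.empty ?_ ?_ ?_ ?_ ?_ ?_ ?_ h
    · unfold pvMeasA pvFuelA
      have hle : ((pvUniv origem voos).filter
          (fun u => !(PySem.Set.contains PySem.Set.empty u))).length ≤
          (pvUniv origem voos).length := List.length_filter_le _ _
      have h1 : (pvEdgeCount voos + 1) *
          ((pvUniv origem voos).filter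
            (fun u => !(PySem.Set.contains PySem.Set.empty u))).length ≤
          (pvEdgeCount voos + 1) * (pvUniv origem voos).length :=
        Nat.mul_le_mul le_rfl hle
      simp only [List.length_singleton]
      omega
    · intro e he
      simp only [List.mem_singleton] at he
      subst he
      rfl
    · intro u hu
      simp [PySem.Set.empty] at hu
    · intro e he
      simp only [List.mem_singleton] at he
      subst he
      simp [pvUniv]
    · simp [PySem.Set.empty]
    · exact Or.inr ⟨(origem, p), List.mem_singleton.2 rfl, rfl⟩
    · intro u hu
      simp [PySem.Set.empty] at hu

-- ===== VERDICT (by name: the statement is the Claim_ definition above) =====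
theorem can_reach_destination_spec : Claim_equal_can_reach_destination := by
  intro origem p destino voos _
  unfold Spec_can_reach_destination
  have := (pvA_iff origem p destino voos).trans (pvAlt_iff origem p destino voos).symm
  cases h1 : can_reach_destination origem p destino voos <;>
    cases h2 : can_reach_destination_alt origem p destino voos <;> simp_all
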